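-- pv_equiv track=rewrite | github.com/mehmetkaratslar/os-simulator-gui | utils/helpers.py | is_deadlock
-- ===== SOURCE A (Python) =====
-- def is_deadlock(graph, resources, processes):
--     """
--     Kaynak tahsis grafında döngü kontrolü yapar
--
--     Parametreler:
--     graph (dict): Kaynak tahsis grafı
--     resources (list): Kaynak listesi
--     processes (list): Proses listesi
--
--     Dönüş:
--     tuple: (Deadlock var mı, döngü)
--     """
--     # Proses bekleme grafı oluştur
--     wait_for = {p: [] for p in processes}
--
--     # Her proses için, talep ettiği ve başka bir proses tarafından kullanılan kaynakları bul
--     for p1 in processes: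
--         for r in resources:
--             # Eğer p1 r kaynağını talep ediyorsa
--             if (p1, r) in graph.get('request', set()):
--                 # r kaynağını hangi proseslerin kullandığını bul
--                 for p2 in processes:
--                     if p2 != p1 and (r, p2) in graph.get('allocation', set()):
--                         # p1 prosesi, p2 prosesinin serbest bırakmasını bekliyor
--                         wait_for[p1].append(p2)
--
--     # Döngü arama algoritması
--     def find_cycle(node, path, visited):
--         if node in path:
--             # Döngü bulundu
--             cycle_start = path.index(node)
--             return path[cycle_start:]
--
--         if node in visited:
--             return None
--
--         visited.add(node)
--         path.append(node)
--
--         for neighbor in wait_for[node]: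
--             cycle = find_cycle(neighbor, path, visited)
--             if cycle:
--                 return cycle
--
--         path.pop()
--         return None
--
--     # Her prosesten başlayarak döngü ara
--     for p in processes:
--         visited = set()
--         cycle = find_cycle(p, [], visited)
--         if cycle:
--             return True, cycle
--
--     return False, []
-- ===== SOURCE B (Python) =====
-- def is_deadlock(graph, resources, processes):
--     """Deadlock (cycle) detection on the wait-for graph, with the per-resource
--     holder lists precomputed once and an explicit-stack (iterative) DFS."""
--     request = graph.get('request', set())
--     allocation = graph.get('allocation', set())
--
--     # Precompute, per resource, the processes currently holding it (removes
--     # the inner scan over all processes for every (p1, r) request pair).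
--     holders = {r: [p for p in processes if (r, p) in allocation] for r in resources}
--
--     wait_for = {}
--     for p in processes:
--         wait_for[p] = []
--     for p1 in processes:
--         for r in resources:
--             if (p1, r) in request:
--                 wait_for[p1].extend(p2 for p2 in holders[r] if p2 != p1)
--
--     # Iterative DFS from each process: explicit stack of remaining-neighbor
--     # lists, a path of nodes currently being explored, and a visited set that
--     # only ever grows within one start.
--     for start in processes:
--         visited = {start}
--         path = [start]
--         stack = [list(wait_for[start])]
--         while stack:
--             frame = stack[-1]
--             if not frame:
--                 stack.pop()
--                 path.pop()
--                 continue
--             nb = frame.pop(0)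
--             if nb in path:
--                 return True, path[path.index(nb):]
--             if nb in visited:
--                 continue
--             visited.add(nb)
--             path.append(nb)
--             stack.append(list(wait_for[nb]))
--     return False, []
-- ===== Notes on version B (the rewrite author's own statement) =====
-- stated objective: alternative
-- what changed: The wait-for graph is built from per-resource holder lists computed once (instead of re-scanning all processes for every (process, resource) request pair), and the recursive find_cycle is replaced by an iterative DFS with an explicit stack of remaining-neighbor lists, a path list, and a growing visited set.
import Mathlib
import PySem

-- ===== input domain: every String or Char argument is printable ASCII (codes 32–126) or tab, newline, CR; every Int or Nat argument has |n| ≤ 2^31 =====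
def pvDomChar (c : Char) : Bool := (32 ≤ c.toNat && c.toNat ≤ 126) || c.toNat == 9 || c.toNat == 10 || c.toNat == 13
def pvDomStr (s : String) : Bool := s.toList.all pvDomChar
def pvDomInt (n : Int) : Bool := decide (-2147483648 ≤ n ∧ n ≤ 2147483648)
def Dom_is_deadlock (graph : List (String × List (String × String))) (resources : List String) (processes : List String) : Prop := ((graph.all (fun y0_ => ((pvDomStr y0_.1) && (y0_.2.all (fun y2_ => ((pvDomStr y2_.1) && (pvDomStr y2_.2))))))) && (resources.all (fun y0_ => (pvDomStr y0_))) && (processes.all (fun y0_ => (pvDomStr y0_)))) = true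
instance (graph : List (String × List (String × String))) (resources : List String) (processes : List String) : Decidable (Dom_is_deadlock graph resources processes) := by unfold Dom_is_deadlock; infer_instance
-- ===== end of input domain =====

-- B changes the wait-for graph construction (per-resource holder lists computed once) and replaces the
-- recursive find_cycle with an explicit-stack iterative DFS; objective: alternative (same result, different structure).

-- ===== shared helpers =====
-- path[path.index(node):] — both Python sources contain this identical expression; path[i:] with
-- 0 ≤ i < len(path) is List.drop i. Only evaluated with node ∈ path.
def pvCycleSlice (path : List String) (node : String) : List String :=
  match PySem.List.index? path node with
  | some i => path.drop i
  | none => path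
-- strings occurring in wait_for's value lists, resp. those plus its keys (used only by the fuel bounds)
def pvVals (wf : PySem.Dict String (List String)) : List String := (wf.items.map (·.2)).flatten
def pvAllN (wf : PySem.Dict String (List String)) : List String := pvVals wf ++ wf.items.map (·.1)

-- ===== PORT A =====
-- wait_for = {p: [] for p in processes}; then the triple loop of appends.
-- (Python's wait_for[p1].append(p2) assumes p1 is a key — always true since p1 ∈ processes; Dict.modify agrees there.)
def pvWaitA (graph : List (String × List (String × String))) (resources : List String) (processes : List String) : PySem.Dict String (List String) :=
  let wf0 := processes.foldl (fun d p => d.insert p ([] : List String)) PySem.Dict.empty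
  processes.foldl (fun d p1 =>
    resources.foldl (fun d r =>
      if ((PySem.Dict.mk graph).getD "request" []).contains (p1, r) then
        processes.foldl (fun d p2 =>
          if p2 != p1 && ((PySem.Dict.mk graph).getD "allocation" []).contains (r, p2) then
            d.modify p1 [] (fun l => l ++ [p2])
          else d) d
      else d) d) wf0

-- the `for neighbor in wait_for[node]` loop of find_cycle; `rec` is the recursive call at the current depth.
-- (`if cycle: return cycle` — find_cycle returns None or path[i:] with node ∈ path, never [], so the test is `is not None`.)
def pvNeighborLoop (rec : String → List String → PySem.Set String → Option (List String) × List String × PySem.Set String) :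
    List String → List String → PySem.Set String → Option (List String) × List String × PySem.Set String
  | [], path, visited => (none, path, visited)
  | nb :: rest, path, visited =>
    match rec nb path visited with
    | (some c, p, v) => (some c, p, v)
    | (none, p, v) => pvNeighborLoop rec rest p v

-- find_cycle(node, path, visited); the mutated path/visited are returned alongside the result.
-- fuel makes the recursion structural (a port artifact); the top-level call receives provably enough.
def pvFindCycle (wf : PySem.Dict String (List String)) : Nat → String → List String → PySem.Set String → Option (List String) × List String × PySem.Set String
  | 0, _, path, visited => (none, path, visited)
  | fuel + 1, node, path, visited =>
    if path.contains node then
      (some (pvCycleSlice path node), path, visited)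
    else if PySem.Set.contains visited node then
      (none, path, visited)
    else
      match pvNeighborLoop (pvFindCycle wf fuel) (wf.getD node []) (path ++ [node]) (PySem.Set.add visited node) with
      | (some c, p, v) => (some c, p, v)
      | (none, p, v) => (none, p.dropLast, v)   -- path.pop(); return None

def pvFuelA (wf : PySem.Dict String (List String)) : Nat := (pvAllN wf).dedup.length + 2

-- for p in processes: visited = set(); cycle = find_cycle(p, [], visited); if cycle: return True, cycle
def pvSearchA (wf : PySem.Dict String (List String)) : List String → Bool × List String
  | [] => (false, [])
  | p :: ps =>
    match (pvFindCycle wf (pvFuelA wf) p [] PySem.Set.empty).1 with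
    | some c => (true, c)
    | none => pvSearchA wf ps

def is_deadlock (graph : List (String × List (String × String))) (resources : List String) (processes : List String) : Bool × List String :=
  pvSearchA (pvWaitA graph resources processes) processes

-- ===== PORT B =====
-- holders = {r: [p for p in processes if (r, p) in allocation] for r in resources}; wait_for built by extend.
def pvWaitB (request allocation : List (String × String)) (resources : List String) (processes : List String) : PySem.Dict String (List String) :=
  let holders := resources.foldl (fun d r => d.insert r (processes.filter (fun p => allocation.contains (r, p)))) PySem.Dict.empty
  let wf0 := processes.foldl (fun d p => d.insert p ([] : List String)) PySem.Dict.empty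
  processes.foldl (fun d p1 =>
    resources.foldl (fun d r =>
      if request.contains (p1, r) then
        d.modify p1 [] (fun l => l ++ (holders.getD r []).filter (fun p2 => p2 != p1))
      else d) d) wf0

def pvFuelB (wf : PySem.Dict String (List String)) : Nat :=
  (pvVals wf).length + 2 + (pvAllN wf).dedup.length * ((pvVals wf).length + 2)

-- the while-stack loop; the stack holds the remaining-neighbor list of each node on the path (top = head).
-- fuel makes the loop structural (a port artifact); the initial call receives provably enough.
def pvGo (wf : PySem.Dict String (List String)) : Nat → List (List String) → List String → PySem.Set String → Option (List String)
  | 0, _, _, _ => none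
  | _ + 1, [], _, _ => none
  | fuel + 1, [] :: rest, path, visited => pvGo wf fuel rest path.dropLast visited
  | fuel + 1, (nb :: ns) :: rest, path, visited =>
    if path.contains nb then some (pvCycleSlice path nb)
    else if PySem.Set.contains visited nb then pvGo wf fuel (ns :: rest) path visited
    else pvGo wf fuel (wf.getD nb [] :: ns :: rest) (path ++ [nb]) (PySem.Set.add visited nb)

def pvSearchB (wf : PySem.Dict String (List String)) : List String → Bool × List String
  | [] => (false, [])
  | start :: ps =>
    match pvGo wf (pvFuelB wf) [wf.getD start []] [start] (PySem.Set.ofList [start]) with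
    | some c => (true, c)
    | none => pvSearchB wf ps

def is_deadlock_alt (graph : List (String × List (String × String))) (resources : List String) (processes : List String) : Bool × List String :=
  let request := (PySem.Dict.mk graph).getD "request" []
  let allocation := (PySem.Dict.mk graph).getD "allocation" []
  pvSearchB (pvWaitB request allocation resources processes) processes

-- ===== PRECONDITION & SPEC =====
def Spec_is_deadlock (graph : List (String × List (String × String))) (resources : List String) (processes : List String) (out : Bool × List String) : Prop := out = is_deadlock_alt graph resources processes
instance (graph : List (String × List (String × String))) (resources : List String) (processes : List String) (out : Bool × List String) : Decidable (Spec_is_deadlock graph resources processes out) := by unfold Spec_is_deadlock; infer_instance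

-- ===== CLAIM (what is proved, stated in full; the proofs are below) =====
def Claim_equal_is_deadlock : Prop := ∀ (graph : List (String × List (String × String))) (resources : List String) (processes : List String), Dom_is_deadlock graph resources processes → Spec_is_deadlock graph resources processes (is_deadlock graph resources processes)

-- ===== LEMMAS AND PROOFS =====

-- ---------- part 1: the two wait-for graph constructions agree ----------

lemma pv_insert_insert (d : PySem.Dict String (List String)) (k : String) (v w : List String) :
    (d.insert k v).insert k w = d.insert k w := by
  by_cases hc : d.contains k = true
  · have h2 : (PySem.Dict.mk (d.items.map (fun p => if (p.1 == k) = true then (k, v) else p)) : PySem.Dict String (List String)).contains k = true := by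
      simp only [PySem.Dict.contains, List.any_eq_true] at hc ⊢
      rcases hc with ⟨p, hp, hpk⟩
      exact ⟨_, List.mem_map_of_mem hp, by simp [hpk]⟩
    apply PySem.Dict.ext
    simp only [PySem.Dict.insert, hc, if_true, h2, List.map_map]
    apply List.map_congr_left
    intro p _
    by_cases hpk : p.1 = k <;> simp [hpk, Function.comp]
  · have hc' : (d.insert k v).contains k = true := by
      simp only [PySem.Dict.insert, hc, PySem.Dict.contains, Bool.not_eq_true] at *
      simp [hc]
    have hitems : ∀ p ∈ d.items, (p.1 == k) = false := by
      simp only [PySem.Dict.contains, Bool.not_eq_true, List.any_eq_false] at hc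
      intro p hp; simpa using hc p hp
    apply PySem.Dict.ext
    simp only [PySem.Dict.insert, hc, hc', if_true, Bool.false_eq_true, if_false]
    simp only [List.map_append, List.map_cons, List.map_nil, beq_self_eq_true, if_true]
    rw [List.map_congr_left (g := id) (fun p hp => by simp [hitems p hp])]
    simp

lemma pv_modify_modify (d : PySem.Dict String (List String)) (k : String) (f g : List String → List String) :
    (d.modify k [] f).modify k [] g = d.modify k [] (fun v => g (f v)) := by
  simp [PySem.Dict.modify, PySem.Dict.getD_insert_self, pv_insert_insert]

lemma pv_modify_append_nil (d : PySem.Dict String (List String)) (k : String)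
    (hn : d.keys.Nodup) (h : d.contains k = true) :
    d.modify k [] (fun l => l ++ []) = d := by
  have hg : (d.get? k).isSome := by rw [← PySem.Dict.contains_eq_isSome_get?]; exact h
  rcases Option.isSome_iff_exists.mp hg with ⟨val, hval⟩
  have : d.getD k [] = val := by rw [PySem.Dict.getD_eq_get?_getD, hval]; rfl
  simp only [PySem.Dict.modify, this, List.append_nil]
  -- goal: d.insert k val = d
  apply PySem.Dict.ext
  simp only [PySem.Dict.insert, h, if_true]
  conv_rhs => rw [← List.map_id d.items]
  apply List.map_congr_left
  intro p hp
  by_cases hpk : (p.1 == k) = true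
  · have hk : p.1 = k := by simpa using hpk
    have hps : d.get? p.1 = some p.2 := PySem.Dict.get?_of_mem_items d (by simpa using hp) hn
    rw [hk, hval] at hps
    have hv2 : p.2 = val := (Option.some_inj.mp hps).symm
    simp [hpk, ← hk, ← hv2]
  · simp [hpk]

lemma pv_foldl_modify_append (C : String → Bool) (l : List String) (k : String)
    (d : PySem.Dict String (List String)) (hn : d.keys.Nodup) (h : d.contains k = true) :
    l.foldl (fun d x => if C x then d.modify k [] (fun v => v ++ [x]) else d) d
      = d.modify k [] (fun v => v ++ l.filter C) := by
  induction l generalizing d with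
  | nil => simpa [List.foldl] using (pv_modify_append_nil d k hn h).symm
  | cons x l ih =>
    by_cases hx : C x = true
    · simp only [List.foldl_cons, hx, if_true, List.filter_cons, ]
      rw [ih (d.modify k [] (fun v => v ++ [x]))
          (by simpa [PySem.Dict.modify] using PySem.Dict.nodup_keys_insert _ _ _ hn)
          (by simp [PySem.Dict.modify, PySem.Dict.contains_insert])]
      rw [pv_modify_modify]
      exact congrArg _ (funext fun v => by simp [hx]) |>.trans rfl
    · simp only [List.foldl_cons, hx, if_false, List.filter_cons, Bool.false_eq_true]
      rw [ih d hn h]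


lemma pv_getD_foldl_insert (F : String → List String) (rs : List String) (d0 : PySem.Dict String (List String)) (k : String) :
    (rs.foldl (fun d r => d.insert r (F r)) d0).getD k []
      = if k ∈ rs then F k else d0.getD k [] := by
  induction rs generalizing d0 with
  | nil => simp
  | cons r rs ih =>
    simp only [List.foldl_cons, ih, List.mem_cons]
    by_cases h1 : k ∈ rs
    · simp [h1]
    · by_cases h2 : k = r <;> simp [h1, h2, PySem.Dict.getD_insert]

lemma pv_foldl_pres {α : Type} (step : PySem.Dict String (List String) → α → PySem.Dict String (List String))
    (P : PySem.Dict String (List String) → Prop) (hstep : ∀ d a, P d → P (step d a)) :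
    ∀ (l : List α) d, P d → P (l.foldl step d) := by
  intro l
  induction l with
  | nil => intro d h; exact h
  | cons a l ih => intro d h; exact ih _ (hstep d a h)

lemma pv_modify_pres (d : PySem.Dict String (List String)) (k : String) (f : List String → List String)
    (q : String) (h : d.contains q = true) : (d.modify k [] f).contains q = true := by
  simp only [PySem.Dict.modify, PySem.Dict.contains_insert, h, Bool.or_true]

lemma pv_modify_nodup (d : PySem.Dict String (List String)) (k : String) (f : List String → List String)
    (h : d.keys.Nodup) : (d.modify k [] f).keys.Nodup := by
  simpa [PySem.Dict.modify] using PySem.Dict.nodup_keys_insert _ _ _ h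

lemma pv_wait_eq (graph : List (String × List (String × String))) (resources processes : List String) :
    pvWaitA graph resources processes
      = pvWaitB ((PySem.Dict.mk graph).getD "request" []) ((PySem.Dict.mk graph).getD "allocation" []) resources processes := by
  unfold pvWaitA pvWaitB
  set req := (PySem.Dict.mk graph).getD "request" [] with hreq
  set alloc := (PySem.Dict.mk graph).getD "allocation" [] with halloc
  set holders := resources.foldl (fun d r => d.insert r (processes.filter (fun p => alloc.contains (r, p)))) PySem.Dict.empty with hh
  set wf0 := processes.foldl (fun d p => d.insert p ([] : List String)) PySem.Dict.empty with hw0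
  -- the per-(p1, r) bodies agree on dicts that contain p1 with unique keys
  have hold : ∀ r ∈ resources, holders.getD r [] = processes.filter (fun p => alloc.contains (r, p)) := by
    intro r hr
    rw [hh, pv_getD_foldl_insert (fun r => processes.filter (fun p => alloc.contains (r, p)))]
    simp [hr]
  have hinner : ∀ (p1 : String) (rs : List String), (∀ r ∈ rs, r ∈ resources) →
      ∀ d : PySem.Dict String (List String), d.contains p1 = true → d.keys.Nodup →
      rs.foldl (fun d r =>
        if req.contains (p1, r) then
          processes.foldl (fun d p2 =>
            if p2 != p1 && alloc.contains (r, p2) then d.modify p1 [] (fun l => l ++ [p2]) else d) d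
        else d) d
      = rs.foldl (fun d r =>
        if req.contains (p1, r) then
          d.modify p1 [] (fun l => l ++ (holders.getD r []).filter (fun p2 => p2 != p1))
        else d) d := by
    intro p1 rs
    induction rs with
    | nil => intro _ d _ _; rfl
    | cons r rs ih =>
      intro hsub d hc hn
      simp only [List.foldl_cons]
      by_cases hq : req.contains (p1, r) = true
      · simp only [hq, if_true]
        have hbody : processes.foldl (fun d p2 =>
              if p2 != p1 && alloc.contains (r, p2) then d.modify p1 [] (fun l => l ++ [p2]) else d) d
            = d.modify p1 [] (fun l => l ++ (holders.getD r []).filter (fun p2 => p2 != p1)) := by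
          rw [pv_foldl_modify_append (fun p2 => p2 != p1 && alloc.contains (r, p2)) processes p1 d hn hc]
          rw [hold r (hsub r (List.mem_cons_self))]
          have hfil : (processes.filter (fun p => alloc.contains (r, p))).filter (fun p2 => p2 != p1)
              = processes.filter (fun p2 => p2 != p1 && alloc.contains (r, p2)) := by
            rw [List.filter_filter]
          rw [hfil]
        rw [hbody]
        exact ih (fun r' hr' => hsub r' (List.mem_cons_of_mem _ hr'))
          _ (pv_modify_pres d p1 _ p1 hc) (pv_modify_nodup d p1 _ hn)
      · simp only [hq, Bool.false_eq_true, if_false]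
        exact ih (fun r' hr' => hsub r' (List.mem_cons_of_mem _ hr')) d hc hn
  -- wf0 contains every process, keys unique
  have hkeys : ∀ p ∈ processes, wf0.contains p = true := by
    intro p hp
    rw [hw0]
    have : (processes.foldl (fun d p => d.insert p ([] : List String)) PySem.Dict.empty).keys
        = PySem.Set.update (PySem.Dict.empty : PySem.Dict String (List String)).keys processes :=
      PySem.Dict.keys_foldl_insert processes (fun _ _ => []) _
    rw [PySem.Dict.contains_iff_mem_keys, this]
    simp [PySem.Set.mem_update, hp]
  have hnod : wf0.keys.Nodup := by
    rw [hw0]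
    exact PySem.Dict.nodup_keys_foldl_insert processes (fun _ _ => []) _ (by simp [PySem.Dict.keys_empty])
  -- outer loop
  have houter : ∀ (ps : List String) (d : PySem.Dict String (List String)),
      (∀ p ∈ ps, d.contains p = true) → d.keys.Nodup →
      ps.foldl (fun d p1 =>
        resources.foldl (fun d r =>
          if req.contains (p1, r) then
            processes.foldl (fun d p2 =>
              if p2 != p1 && alloc.contains (r, p2) then d.modify p1 [] (fun l => l ++ [p2]) else d) d
          else d) d) d
      = ps.foldl (fun d p1 =>
        resources.foldl (fun d r =>
          if req.contains (p1, r) then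
            d.modify p1 [] (fun l => l ++ (holders.getD r []).filter (fun p2 => p2 != p1))
          else d) d) d := by
    intro ps
    induction ps with
    | nil => intro d _ _; rfl
    | cons p1 ps ih =>
      intro d hc hn
      simp only [List.foldl_cons]
      rw [hinner p1 resources (fun _ hr => hr) d (hc p1 List.mem_cons_self) hn]
      have hpres : (∀ p ∈ ps, (resources.foldl (fun d r =>
            if req.contains (p1, r) then
              d.modify p1 [] (fun l => l ++ (holders.getD r []).filter (fun p2 => p2 != p1))
            else d) d).contains p = true)
          ∧ (resources.foldl (fun d r =>
            if req.contains (p1, r) then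
              d.modify p1 [] (fun l => l ++ (holders.getD r []).filter (fun p2 => p2 != p1))
            else d) d).keys.Nodup := by
        have := pv_foldl_pres (fun d r =>
            if req.contains (p1, r) then
              d.modify p1 [] (fun l => l ++ (holders.getD r []).filter (fun p2 => p2 != p1))
            else d)
          (fun d => (∀ p ∈ ps, d.contains p = true) ∧ d.keys.Nodup)
          (fun d r hd => by
            constructor
            · intro p hp
              by_cases hq : req.contains (p1, r) = true
              · simp only [hq, if_true]; exact pv_modify_pres d p1 _ p (hd.1 p hp)
              · simp only [hq, Bool.false_eq_true, if_false] at *; exact hd.1 p hp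
            · by_cases hq : req.contains (p1, r) = true
              · simp only [hq, if_true]; exact pv_modify_nodup d p1 _ hd.2
              · simp only [hq, Bool.false_eq_true, if_false] at *; exact hd.2)
          resources d ⟨fun p hp => hc p (List.mem_cons_of_mem _ hp), hn⟩
        exact this
      exact ih _ hpres.1 hpres.2
  exact houter processes wf0 hkeys hnod

-- ---------- part 2: the iterative DFS equals the recursive one ----------

def pvM (wf : PySem.Dict String (List String)) (v : PySem.Set String) : Nat :=
  ((pvAllN wf).dedup.filter (fun x => !(PySem.Set.contains v x))).length

lemma pv_contains_add (v : PySem.Set String) (n x : String) :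
    (PySem.Set.add v n).contains x = (v.contains x || x == n) := by
  rw [Bool.eq_iff_iff]
  simp [PySem.Set.contains_iff, PySem.Set.mem_add, beq_iff_eq]

lemma pv_getD_key {wf : PySem.Dict String (List String)} {node : String}
    (h : wf.getD node [] ≠ []) : node ∈ pvAllN wf := by
  rcases hg : wf.get? node with _ | val
  · exact absurd (by rw [PySem.Dict.getD_eq_get?_getD, hg]; rfl) h
  · have : node ∈ wf.keys := by
      by_contra hk
      rw [(PySem.Dict.get?_eq_none_iff_not_mem_keys wf node).mpr hk] at hg
      cases hg
    exact List.mem_append.2 (Or.inr (by simpa [PySem.Dict.keys] using this))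

lemma pv_getD_subset {wf : PySem.Dict String (List String)} {node x : String}
    (h : x ∈ wf.getD node []) : x ∈ pvVals wf := by
  rcases hg : wf.get? node with _ | val
  · rw [PySem.Dict.getD_eq_get?_getD, hg] at h; cases h
  · rw [PySem.Dict.getD_eq_get?_getD, hg] at h
    have hiv : (node, val) ∈ wf.items := PySem.Dict.mem_items_of_get?_eq_some wf hg
    exact List.mem_flatten.2 ⟨val, List.mem_map.2 ⟨(node, val), hiv, rfl⟩, h⟩

lemma pv_getD_len (wf : PySem.Dict String (List String)) (node : String) :
    (wf.getD node []).length ≤ (pvVals wf).length := by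
  rcases hg : wf.get? node with _ | val
  · rw [PySem.Dict.getD_eq_get?_getD, hg]; simp
  · rw [PySem.Dict.getD_eq_get?_getD, hg]
    have hiv : (node, val) ∈ wf.items := PySem.Dict.mem_items_of_get?_eq_some wf hg
    have : val ∈ wf.items.map (·.2) := List.mem_map.2 ⟨(node, val), hiv, rfl⟩
    exact (List.sublist_flatten_of_mem this).length_le

lemma pvM_mono {wf : PySem.Dict String (List String)} {v v' : PySem.Set String}
    (h : ∀ x, v.contains x = true → v'.contains x = true) : pvM wf v' ≤ pvM wf v := by
  apply List.Sublist.length_le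
  apply List.monotone_filter_right
  intro a ha
  simp only [Bool.not_eq_true'] at ha ⊢
  by_contra hc
  simp only [Bool.not_eq_false] at hc
  rw [h a hc] at ha
  cases ha

lemma pv_filter_remove (l : List String) (C : String → Bool) (n : String)
    (hl : l.Nodup) (hn : n ∈ l) (hCn : C n = true) :
    (l.filter (fun x => C x && !(x == n))).length + 1 = (l.filter C).length := by
  induction l with
  | nil => cases hn
  | cons y l ih =>
    by_cases hyeq : y = n
    · subst hyeq
      have hnl : y ∉ l := (List.nodup_cons.1 hl).1
      have hfl : l.filter (fun x => C x && !(x == y)) = l.filter C :=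
        List.filter_congr (fun x hx => by
          have hne : x ≠ y := fun he => hnl (he ▸ hx)
          simp [hne])
      simp [List.filter_cons, hCn, hfl]
    · have hmem : n ∈ l := by
        rcases List.mem_cons.1 hn with h | h
        · exact absurd h.symm hyeq
        · exact h
      have h1 : (y == n) = false := by simp [hyeq]
      by_cases hCy : C y = true <;>
        simp [List.filter_cons, hCy, h1, ih (List.nodup_cons.1 hl).2 hmem]
lemma pvM_add {wf : PySem.Dict String (List String)} {v : PySem.Set String} {n : String}
    (hn : n ∈ pvAllN wf) (hv : v.contains n = false) :
    pvM wf (PySem.Set.add v n) + 1 = pvM wf v := by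
  unfold pvM
  have hped : ∀ x, (!(PySem.Set.add v n).contains x) = ((!(PySem.Set.contains v x)) && !(x == n)) := by
    intro x
    rw [pv_contains_add]
    cases hvx : PySem.Set.contains v x <;> cases hxn : x == n <;> simp_all
  rw [List.filter_congr (fun x _ => hped x)]
  exact pv_filter_remove _ _ n (List.nodup_dedup _) (List.mem_dedup.2 hn) (by simp only [Bool.not_eq_true']; exact hv)

lemma pv_growL (wf : PySem.Dict String (List String)) (fuel : Nat)
    (hA : ∀ node path v x, v.contains x = true → ((pvFindCycle wf fuel node path v).2.2).contains x = true) :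
    ∀ ns path v x, v.contains x = true → ((pvNeighborLoop (pvFindCycle wf fuel) ns path v).2.2).contains x = true := by
  intro ns
  induction ns with
  | nil => intro path v x h; exact h
  | cons nb rest ih =>
    intro path v x h
    simp only [pvNeighborLoop]
    rcases hres : pvFindCycle wf fuel nb path v with ⟨c, p, v'⟩
    have hv' : v'.contains x = true := by
      have := hA nb path v x h
      rw [hres] at this
      exact this
    cases c with
    | some c => simpa [hres] using hv'
    | none => simpa [hres] using ih p v' x hv'

lemma pv_growA (wf : PySem.Dict String (List String)) :
    ∀ fuel node path v x, v.contains x = true → ((pvFindCycle wf fuel node path v).2.2).contains x = true := by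
  intro fuel
  induction fuel with
  | zero => intro node path v x h; exact h
  | succ f ih =>
    intro node path v x h
    simp only [pvFindCycle]
    by_cases h1 : path.contains node = true
    · rw [if_pos h1]; exact h
    · rw [if_neg h1]
      by_cases h2 : PySem.Set.contains v node = true
      · rw [if_pos h2]; exact h
      · rw [if_neg h2]
        have hadd : (PySem.Set.add v node).contains x = true := by
          rw [pv_contains_add, h]; rfl
        have := pv_growL wf f ih (wf.getD node []) (path ++ [node]) (PySem.Set.add v node) x hadd
        rcases hres : pvNeighborLoop (pvFindCycle wf f) (wf.getD node []) (path ++ [node]) (PySem.Set.add v node) with ⟨c, p, v'⟩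
        rw [hres] at this
        cases c <;> simpa [hres] using this

def pvStabA (wf : PySem.Dict String (List String)) (f : Nat) : Prop :=
  ∀ node path v, pvM wf v + 1 ≤ f → pvFindCycle wf f node path v = pvFindCycle wf (f + 1) node path v

def pvStabL (wf : PySem.Dict String (List String)) (f : Nat) : Prop :=
  ∀ ns path v, pvM wf v + 1 ≤ f →
    pvNeighborLoop (pvFindCycle wf f) ns path v = pvNeighborLoop (pvFindCycle wf (f + 1)) ns path v

lemma pv_stabL_of_stabA (wf : PySem.Dict String (List String)) (f : Nat) (hA : pvStabA wf f) : pvStabL wf f := by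
  intro ns
  induction ns with
  | nil => intro path v _; rfl
  | cons nb rest ih =>
    intro path v hM
    simp only [pvNeighborLoop]
    rw [← hA nb path v hM]
    rcases hres : pvFindCycle wf f nb path v with ⟨c, p, v'⟩
    have hsub : ∀ x, v.contains x = true → v'.contains x = true := by
      intro x hx
      have := pv_growA wf f nb path v x hx
      rw [hres] at this
      exact this
    have hM' : pvM wf v' + 1 ≤ f := le_trans (Nat.add_le_add_right (pvM_mono hsub) 1) hM
    cases c with
    | some c => rfl
    | none => exact ih p v' hM'

lemma pv_stabA_all (wf : PySem.Dict String (List String)) : ∀ f, pvStabA wf f := by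
  intro f
  induction f with
  | zero => intro node path v hM; omega
  | succ f ih =>
    intro node path v hM
    simp only [pvFindCycle]
    by_cases h1 : path.contains node = true
    · rw [if_pos h1, if_pos h1]
    · rw [if_neg h1, if_neg h1]
      by_cases h2 : PySem.Set.contains v node = true
      · rw [if_pos h2, if_pos h2]
      · rw [if_neg h2, if_neg h2]
        by_cases hL : wf.getD node [] = []
        · rw [hL]; rfl
        · have hnode : node ∈ pvAllN wf := pv_getD_key hL
          have hMadd : pvM wf (PySem.Set.add v node) + 1 ≤ f := by
            have := pvM_add (wf := wf) hnode (by simpa using h2)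
            omega
          rw [pv_stabL_of_stabA wf f ih (wf.getD node []) (path ++ [node]) (PySem.Set.add v node) hMadd]
          rfl


lemma pv_stabL_ge (wf : PySem.Dict String (List String)) :
    ∀ {f g : Nat}, f ≤ g → ∀ ns path v, pvM wf v + 1 ≤ f →
      pvNeighborLoop (pvFindCycle wf f) ns path v = pvNeighborLoop (pvFindCycle wf g) ns path v := by
  intro f g hfg
  induction g with
  | zero => intro ns path v hM; omega
  | succ g ihg =>
    intro ns path v hM
    by_cases hfe : f = g + 1
    · subst hfe; rfl
    · have hle : f ≤ g := by omega
      rw [ihg hle ns path v hM]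
      exact pv_stabL_of_stabA wf g (pv_stabA_all wf g) ns path v (le_trans hM hle)

def pvPhi (wf : PySem.Dict String (List String)) (frames : List (List String)) (v : PySem.Set String) : Nat :=
  frames.flatten.length + frames.length + pvM wf v * ((pvVals wf).length + 2)

def pvInterp (wf : PySem.Dict String (List String)) : List (List String) → List String → PySem.Set String → Option (List String)
  | [], _, _ => none
  | ns :: rest, path, v =>
    match pvNeighborLoop (pvFindCycle wf (pvM wf v + 1)) ns path v with
    | (some c, _, _) => some c
    | (none, p, v') => pvInterp wf rest p.dropLast v'

lemma pv_sim (wf : PySem.Dict String (List String)) :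
    ∀ fb frames path v, (∀ y ∈ frames.flatten, y ∈ pvVals wf) → pvPhi wf frames v + 1 ≤ fb →
      pvGo wf fb frames path v = pvInterp wf frames path v := by
  intro fb
  induction fb with
  | zero => intro frames path v _ hF; omega
  | succ fb ih =>
    intro frames path v hInv hF
    match frames with
    | [] => rfl
    | [] :: rest =>
      show pvGo wf fb rest path.dropLast v = _
      have h1 : pvInterp wf ([] :: rest) path v = pvInterp wf rest path.dropLast v := by
        simp only [pvInterp, pvNeighborLoop]
      rw [h1]
      apply ih rest path.dropLast v (fun y hy => hInv y (by simpa using hy))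
      have : pvPhi wf rest v + 1 ≤ pvPhi wf ([] :: rest) v := by
        simp [pvPhi]; try ring
      omega
    | (nb :: ns) :: rest =>
      have hnb : nb ∈ pvVals wf := hInv nb (by simp)
      by_cases h1 : path.contains nb = true
      · show (if path.contains nb then some (pvCycleSlice path nb)
              else if PySem.Set.contains v nb then pvGo wf fb (ns :: rest) path v
              else pvGo wf fb (wf.getD nb [] :: ns :: rest) (path ++ [nb]) (PySem.Set.add v nb))
            = pvInterp wf ((nb :: ns) :: rest) path v
        rw [if_pos h1]
        simp only [pvInterp, pvNeighborLoop, pvFindCycle]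
        rw [if_pos h1]
      · by_cases h2 : PySem.Set.contains v nb = true
        · show (if path.contains nb then some (pvCycleSlice path nb)
                else if PySem.Set.contains v nb then pvGo wf fb (ns :: rest) path v
                else pvGo wf fb (wf.getD nb [] :: ns :: rest) (path ++ [nb]) (PySem.Set.add v nb))
              = pvInterp wf ((nb :: ns) :: rest) path v
          rw [if_neg h1, if_pos h2]
          have hgo : pvGo wf fb (ns :: rest) path v = pvInterp wf (ns :: rest) path v := by
            apply ih _ _ _ (fun y hy => hInv y (by simp at hy ⊢; tauto))
            have : pvPhi wf (ns :: rest) v + 1 ≤ pvPhi wf ((nb :: ns) :: rest) v := by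
              simp [pvPhi]; try ring
            omega
          rw [hgo]
          simp only [pvInterp, pvNeighborLoop, pvFindCycle]
          rw [if_neg h1, if_pos h2]
        · -- push case
          have hvadd := pvM_add (wf := wf) (List.mem_append.2 (Or.inl hnb)) (by simpa using h2)
          show (if path.contains nb then some (pvCycleSlice path nb)
                else if PySem.Set.contains v nb then pvGo wf fb (ns :: rest) path v
                else pvGo wf fb (wf.getD nb [] :: ns :: rest) (path ++ [nb]) (PySem.Set.add v nb))
              = pvInterp wf ((nb :: ns) :: rest) path v
          rw [if_neg h1, if_neg h2]
          have hgo : pvGo wf fb (wf.getD nb [] :: ns :: rest) (path ++ [nb]) (PySem.Set.add v nb)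
              = pvInterp wf (wf.getD nb [] :: ns :: rest) (path ++ [nb]) (PySem.Set.add v nb) := by
            apply ih _ _ _
            · intro y hy
              simp only [List.flatten_cons, List.mem_append] at hy ⊢
              rcases hy with hy | hy
              · exact pv_getD_subset hy
              · exact hInv y (by simp at hy ⊢; tauto)
            · have hlen : (wf.getD nb []).length ≤ (pvVals wf).length := pv_getD_len wf nb
              have e1 : pvPhi wf (wf.getD nb [] :: ns :: rest) (PySem.Set.add v nb)
                  = (wf.getD nb []).length + (ns.length + rest.flatten.length) + (rest.length + 2)
                    + pvM wf (PySem.Set.add v nb) * ((pvVals wf).length + 2) := by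
                simp [pvPhi]; try ring
              have e2 : pvPhi wf ((nb :: ns) :: rest) v
                  = 1 + (ns.length + rest.flatten.length) + (rest.length + 1)
                    + pvM wf v * ((pvVals wf).length + 2) := by
                simp [pvPhi]; try ring
              have e3 : pvM wf v * ((pvVals wf).length + 2)
                  = pvM wf (PySem.Set.add v nb) * ((pvVals wf).length + 2) + ((pvVals wf).length + 2) := by
                rw [← hvadd]; ring
              omega
          rw [hgo]
          -- now pure recursive-side reasoning
          have hfc : pvFindCycle wf (pvM wf v + 1) nb path v
              = (match pvNeighborLoop (pvFindCycle wf (pvM wf v)) (wf.getD nb []) (path ++ [nb]) (PySem.Set.add v nb) with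
                 | (some c, p, w) => (some c, p, w)
                 | (none, p, w) => (none, p.dropLast, w)) := by
            simp only [pvFindCycle]
            rw [if_neg h1, if_neg h2]
          have hfuel : pvM wf v = pvM wf (PySem.Set.add v nb) + 1 := by omega
          rcases hres : pvNeighborLoop (pvFindCycle wf (pvM wf (PySem.Set.add v nb) + 1)) (wf.getD nb []) (path ++ [nb]) (PySem.Set.add v nb)
            with ⟨c, p'', v''⟩
          cases c with
          | some c =>
            have hL : pvInterp wf (wf.getD nb [] :: ns :: rest) (path ++ [nb]) (PySem.Set.add v nb) = some c := by
              simp only [pvInterp, hres]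
            have hR : pvInterp wf ((nb :: ns) :: rest) path v = some c := by
              simp only [pvInterp, pvNeighborLoop]
              rw [hfc, hfuel, hres]
            rw [hL, hR]
          | none =>
            have hgrow : ∀ x, v.contains x = true → v''.contains x = true := by
              intro x hx
              have hx' : (PySem.Set.add v nb).contains x = true := by
                rw [pv_contains_add, hx]; rfl
              have := pv_growL wf (pvM wf (PySem.Set.add v nb) + 1)
                (fun node path v x h => pv_growA wf _ node path v x h)
                (wf.getD nb []) (path ++ [nb]) (PySem.Set.add v nb) x hx'
              rw [hres] at this
              exact this
            have hMle : pvM wf v'' + 1 ≤ pvM wf v + 1 := Nat.add_le_add_right (pvM_mono hgrow) 1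
            have hstab : pvNeighborLoop (pvFindCycle wf (pvM wf v'' + 1)) ns p''.dropLast v''
                = pvNeighborLoop (pvFindCycle wf (pvM wf v + 1)) ns p''.dropLast v'' :=
              pv_stabL_ge wf hMle ns p''.dropLast v'' (le_refl _)
            have hL : pvInterp wf (wf.getD nb [] :: ns :: rest) (path ++ [nb]) (PySem.Set.add v nb)
                = pvInterp wf (ns :: rest) p''.dropLast v'' := by
              simp only [pvInterp, hres]
            have hR : pvInterp wf ((nb :: ns) :: rest) path v
                = match pvNeighborLoop (pvFindCycle wf (pvM wf v + 1)) ns p''.dropLast v'' with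
                  | (some c, _, _) => some c
                  | (none, p, w) => pvInterp wf rest p.dropLast w := by
              simp only [pvInterp, pvNeighborLoop]
              rw [hfc, hfuel, hres]
            rw [hL, hR]
            simp only [pvInterp]
            rw [hstab]

lemma pv_findCycle_succ (wf : PySem.Dict String (List String)) (f : Nat) (node : String)
    (path : List String) (visited : PySem.Set String) :
    pvFindCycle wf (f + 1) node path visited =
      if path.contains node then
        (some (pvCycleSlice path node), path, visited)
      else if PySem.Set.contains visited node then
        (none, path, visited)
      else
        match pvNeighborLoop (pvFindCycle wf f) (wf.getD node []) (path ++ [node]) (PySem.Set.add visited node) with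
        | (some c, p, v) => (some c, p, v)
        | (none, p, v) => (none, p.dropLast, v) := rfl

lemma pvM_le (wf : PySem.Dict String (List String)) (v : PySem.Set String) :
    pvM wf v ≤ (pvAllN wf).dedup.length :=
  List.Sublist.length_le List.filter_sublist

lemma pv_start (wf : PySem.Dict String (List String)) (p : String) :
    (pvFindCycle wf (pvFuelA wf) p [] PySem.Set.empty).1
      = pvGo wf (pvFuelB wf) [wf.getD p []] [p] (PySem.Set.ofList [p]) := by
  have hof : (PySem.Set.ofList [p] : PySem.Set String) = PySem.Set.add PySem.Set.empty p := rfl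
  have hemp : (PySem.Set.empty : PySem.Set String).contains p = false := rfl
  have hnilc : (([] : List String).contains p) = false := rfl
  -- RHS by simulation
  have hInv : ∀ y ∈ ([wf.getD p []] : List (List String)).flatten, y ∈ pvVals wf := by
    intro y hy
    exact pv_getD_subset (by simpa using hy)
  have hMν : pvM wf (PySem.Set.ofList [p]) ≤ (pvAllN wf).dedup.length := pvM_le _ _
  have hPhi : pvPhi wf [wf.getD p []] (PySem.Set.ofList [p]) + 1 ≤ pvFuelB wf := by
    have h1 : (wf.getD p []).length ≤ (pvVals wf).length := pv_getD_len wf p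
    have h2 : pvM wf (PySem.Set.ofList [p]) * ((pvVals wf).length + 2)
        ≤ (pvAllN wf).dedup.length * ((pvVals wf).length + 2) :=
      Nat.mul_le_mul_right _ hMν
    have e : pvPhi wf [wf.getD p []] (PySem.Set.ofList [p])
        = (wf.getD p []).length + 1 + pvM wf (PySem.Set.ofList [p]) * ((pvVals wf).length + 2) := by
      simp [pvPhi]; try ring
    rw [e]
    simp only [pvFuelB]
    omega
  rw [pv_sim wf (pvFuelB wf) [wf.getD p []] [p] (PySem.Set.ofList [p]) hInv hPhi]
  -- unfold the A side one step: fuelA = (D + 1) + 1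
  show (pvFindCycle wf ((pvAllN wf).dedup.length + 1 + 1) p [] PySem.Set.empty).1 = _
  rw [pv_findCycle_succ]
  rw [if_neg (by rw [hnilc]; exact Bool.false_ne_true), if_neg (by rw [hemp]; exact Bool.false_ne_true)]
  rw [← hof]
  simp only [List.nil_append]
  by_cases hL : wf.getD p [] = []
  · rw [hL]
    simp only [pvNeighborLoop, pvInterp]
  · have hp : p ∈ pvAllN wf := pv_getD_key hL
    have hMv : pvM wf (PySem.Set.ofList [p]) + 1 = (pvAllN wf).dedup.length := by
      have := pvM_add (wf := wf) (v := PySem.Set.empty) (n := p) hp hemp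
      have hMe : pvM wf PySem.Set.empty = (pvAllN wf).dedup.length := by
        unfold pvM
        rw [List.filter_congr (fun x _ => by simp [hemp]; rfl)]
        simp
      rw [hof, this, hMe]
    have hstab := pv_stabL_ge wf (f := pvM wf (PySem.Set.ofList [p]) + 1)
      (g := (pvAllN wf).dedup.length + 1) (by omega)
      (wf.getD p []) [p] (PySem.Set.ofList [p]) (le_refl _)
    rw [← hstab]
    simp only [pvInterp]
    rcases hres : pvNeighborLoop (pvFindCycle wf (pvM wf (PySem.Set.ofList [p]) + 1)) (wf.getD p []) [p] (PySem.Set.ofList [p])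
      with ⟨c, q, w⟩
    cases c <;> simp [pvInterp]

lemma pv_search_eq (wf : PySem.Dict String (List String)) (ps : List String) :
    pvSearchA wf ps = pvSearchB wf ps := by
  induction ps with
  | nil => rfl
  | cons p ps ih =>
    show (match (pvFindCycle wf (pvFuelA wf) p [] PySem.Set.empty).1 with
          | some c => (true, c)
          | none => pvSearchA wf ps)
        = (match pvGo wf (pvFuelB wf) [wf.getD p []] [p] (PySem.Set.ofList [p]) with
          | some c => (true, c)
          | none => pvSearchB wf ps)
    rw [← pv_start]
    rcases h : (pvFindCycle wf (pvFuelA wf) p [] PySem.Set.empty).1 with _ | c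
    · simpa using ih
    · rfl

-- ===== VERDICT (by name: the statement is the Claim_ definition above) =====
theorem is_deadlock_spec : Claim_equal_is_deadlock := by
  intro graph resources processes _
  unfold Spec_is_deadlock is_deadlock is_deadlock_alt
  rw [pv_wait_eq]
  exact pv_search_eq _ _
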